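-- pv_equiv track=rewrite | github.com/g-g-lim/gitoy | src/util/path.py | accumulate_paths
-- ===== SOURCE A (Python) =====
-- def accumulate_paths(path: str):
--     parts = path.split("/")
--     result = []
--     for i in range(1, len(parts) + 1):
--         prefix = "." if parts[0] == "." else ""
--         joined = "/".join(parts[:i])
--         # 첫 번째가 '.'이면 항상 './'로 시작하게
--         if prefix and not joined.startswith("./"):
--             joined = prefix + joined.lstrip(".")
--         result.append(joined)
--     return result
-- ===== SOURCE B (Python) =====
-- def accumulate_paths(path: str):
--     # Single pass with a running accumulator: each prefix extends the previous
--     # one, instead of re-joining a slice at every step.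
--     parts = path.split("/")
--     acc = parts[0]
--     result = [acc]
--     for part in parts[1:]:
--         acc = acc + "/" + part
--         result.append(acc)
--     return result
-- ===== Notes on version B (the rewrite author's own statement) =====
-- stated objective: simpler
-- what changed: B replaces A's per-iteration slice-then-join (and A's inert dot-prefix branch, which never changes the result) with a single pass that extends a running accumulator by the separator plus the next part and appends it.
import Mathlib
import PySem

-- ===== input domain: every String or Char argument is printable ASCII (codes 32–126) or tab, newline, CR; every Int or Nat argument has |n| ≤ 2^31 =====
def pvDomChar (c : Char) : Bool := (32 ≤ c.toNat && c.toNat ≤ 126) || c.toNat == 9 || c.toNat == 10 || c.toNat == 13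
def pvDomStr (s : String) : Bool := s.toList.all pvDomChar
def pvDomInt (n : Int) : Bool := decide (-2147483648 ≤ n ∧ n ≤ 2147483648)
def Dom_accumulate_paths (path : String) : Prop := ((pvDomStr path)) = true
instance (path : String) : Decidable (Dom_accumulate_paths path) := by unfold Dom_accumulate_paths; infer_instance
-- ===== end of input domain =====

-- B replaces A's per-step slice-and-join (and A's inert dot branch) by a single
-- accumulator pass that extends the previous prefix; objective: simpler.

-- ===== PORT A =====
-- joined.lstrip(".") : exact hand port of str.lstrip with the single strip char '.'
def pvLstripDots (s : List Char) : List Char := s.dropWhile (· == '.')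

-- one iteration of A's loop body, for loop index i (strings as List Char;
-- parts[0] ported as pyGetD since split never yields an empty list)
def pvBodyA (parts : List (List Char)) (i : Int) : List Char :=
  let pre : List Char := if PySem.List.pyGetD parts 0 [] = ['.'] then ['.'] else []
  let joined := PySem.Chars.join ['/'] (PySem.List.slice parts none (some i))
  if pre ≠ [] ∧ PySem.Chars.startswith joined ['.', '/'] = false then
    pre ++ pvLstripDots joined
  else joined

def accumulate_paths (path : String) : List String :=
  let parts := PySem.Chars.splitOn path.toList ['/']
  ((PySem.List.pyRange 1 ((parts.length : Int) + 1) 1).foldl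
      (fun result i => result ++ [pvBodyA parts i]) []).map String.ofList

-- ===== PORT B =====
-- B's loop: extend the running accumulator by "/" + part, collecting each value
def pvAccAux (acc : List Char) (rest : List (List Char)) : List (List Char) :=
  match rest with
  | [] => []
  | p :: rest' => (acc ++ '/' :: p) :: pvAccAux (acc ++ '/' :: p) rest'

def accumulate_paths_alt (path : String) : List String :=
  (match PySem.Chars.splitOn path.toList ['/'] with
   | [] => []   -- unreachable: str.split never returns an empty list
   | p :: rest => p :: pvAccAux p rest).map String.ofList

-- ===== PRECONDITION & SPEC =====
def Spec_accumulate_paths (path : String) (out : List String) : Prop := out = accumulate_paths_alt path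
instance (path : String) (out : List String) : Decidable (Spec_accumulate_paths path out) := by unfold Spec_accumulate_paths; infer_instance

-- ===== CLAIM (what is proved, stated in full; the proofs are below) =====
def Claim_equal_accumulate_paths : Prop := ∀ (path : String), Dom_accumulate_paths path → Spec_accumulate_paths path (accumulate_paths path)

-- ===== LEMMAS AND PROOFS =====

-- A's dot branch is a no-op: for 1 ≤ i ≤ len(parts), the body is just the join of the slice
theorem pvBodyA_eq_joinTake (p : List Char) (rest : List (List Char)) (k : Nat)
    (hk : k < rest.length + 1) :
    pvBodyA (p :: rest) (1 + (k : Int)) =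
      PySem.Chars.join ['/'] ((p :: rest).take (k + 1)) := by
  simp only [pvBodyA]
  rw [PySem.List.slice_to (p :: rest) (b := 1 + (k : Int)) (by omega)]
  have ht : ((1 : Int) + (k : Int)).toNat = k + 1 := by omega
  rw [ht]
  by_cases hp : p = ['.']
  · subst hp
    cases k with
    | zero =>
        simp only [PySem.List.pyGetD_zero_cons, List.take_succ_cons, List.take_zero,
          PySem.Chars.join_singleton]
        decide
    | succ k' =>
        have hrest : rest ≠ [] := by intro h; subst h; simp at hk
        obtain ⟨q, rest2, rfl⟩ := List.exists_cons_of_ne_nil hrest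
        simp only [List.take_succ_cons]
        rw [PySem.Chars.join_cons_cons]
        have hsw : PySem.Chars.startswith
            ('.' :: '/' :: PySem.Chars.join ['/'] (q :: rest2.take k')) ['.', '/'] = true := by
          rw [PySem.Chars.startswith_iff]
          exact ⟨_, rfl⟩
        simp [PySem.List.pyGetD_zero_cons, hsw]
  · simp [PySem.List.pyGetD_zero_cons, hp]

-- B's accumulator pass computes exactly the joins of the growing prefixes of `rest`, each glued after `acc`
theorem pvAccAux_eq_map_joinTake (rest : List (List Char)) (acc : List Char) :
    pvAccAux acc rest =
      (List.range rest.length).map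
        (fun k => acc ++ '/' :: PySem.Chars.join ['/'] (rest.take (k + 1))) := by
  induction rest generalizing acc with
  | nil => simp [pvAccAux]
  | cons p rest' ih =>
      simp only [pvAccAux, List.length_cons, List.range_succ_eq_map, List.map_cons, List.map_map]
      rw [List.cons.injEq]
      refine ⟨?_, ?_⟩
      · simp [PySem.Chars.join_singleton]
      · rw [ih (acc ++ '/' :: p)]
        apply List.map_congr_left
        intro k hk
        have hk' : k < rest'.length := List.mem_range.mp hk
        have hne : rest'.take (k + 1) ≠ [] := by
          intro h
          have hl := congrArg List.length h
          rw [List.length_take] at hl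
          simp only [List.length_nil] at hl
          omega
        obtain ⟨q, t, hqt⟩ := List.exists_cons_of_ne_nil hne
        simp only [Function.comp, Nat.succ_eq_add_one, List.take_succ_cons, hqt]
        rw [PySem.Chars.join_cons_cons]
        simp

-- the joins of all nonempty prefixes of p :: rest are p followed by B's accumulator values
theorem map_joinTake_eq_cons_accAux (p : List Char) (rest : List (List Char)) :
    (List.range (rest.length + 1)).map
        (fun k => PySem.Chars.join ['/'] ((p :: rest).take (k + 1))) =
      p :: pvAccAux p rest := by
  rw [List.range_succ_eq_map, List.map_cons, List.map_map]
  rw [List.cons.injEq]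
  refine ⟨?_, ?_⟩
  · simp [PySem.Chars.join_singleton]
  · rw [pvAccAux_eq_map_joinTake rest p]
    apply List.map_congr_left
    intro k hk
    have hk' : k < rest.length := List.mem_range.mp hk
    have hne : rest.take (k + 1) ≠ [] := by
      intro h
      have hl := congrArg List.length h
      rw [List.length_take] at hl
      simp only [List.length_nil] at hl
      omega
    obtain ⟨q, t, hqt⟩ := List.exists_cons_of_ne_nil hne
    simp only [Function.comp, Nat.succ_eq_add_one, List.take_succ_cons, hqt]
    rw [PySem.Chars.join_cons_cons]
    simp

-- ===== VERDICT (by name: the statement is the Claim_ definition above) =====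
theorem accumulate_paths_spec : Claim_equal_accumulate_paths := by
  intro path _
  simp only [Spec_accumulate_paths, accumulate_paths, accumulate_paths_alt]
  cases hsplit : PySem.Chars.splitOn path.toList ['/'] with
  | nil =>
      have h0 : ((([] : List (List Char)).length : Int) + 1) = 1 := by simp
      rw [h0, PySem.List.pyRange_one_eq_nil (by omega)]
      rfl
  | cons p rest =>
      have h1 : (PySem.List.pyRange 1 (((p :: rest).length : Int) + 1) 1).foldl
          (fun result i => result ++ [pvBodyA (p :: rest) i]) [] = p :: pvAccAux p rest := by
        rw [PySem.List.foldl_append_singleton_eq_map, List.nil_append,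
          PySem.List.pyRange_one, List.map_map]
        have hlen : ((((p :: rest).length : Int) + 1) - 1).toNat = rest.length + 1 := by
          simp only [List.length_cons]; omega
        rw [hlen, ← map_joinTake_eq_cons_accAux p rest]
        apply List.map_congr_left
        intro k hk
        have hk' : k < rest.length + 1 := List.mem_range.mp hk
        simpa using pvBodyA_eq_joinTake p rest k hk'
      rw [h1]
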